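-- pv_equiv track=rewrite | github.com/ZiyangS/MachineLearning | Decision_Tree/decision_tree.py | get_majority_label
-- ===== SOURCE A (Python) =====
-- import operator
--
-- def get_majority_label(class_list):
--     '''
--     get the most frequent label, will be used to label a node.
--     '''
--     class_count={}
--     for vote in class_list:
--         if vote not in class_count.keys():
--             class_count[vote] = 0
--         else:
--             class_count[vote] += 1
--     sorted_class_count = sorted(class_count.items(), key=operator.itemgetter(1), reverse=True)
--     return sorted_class_count[0][0]
-- ===== SOURCE B (Python) =====
-- def get_majority_label(class_list):
--     '''
--     get the most frequent label, will be used to label a node.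
--     '''
--     counts = {}
--     for x in class_list:
--         counts[x] = counts.get(x, 0) + 1
--     items = list(counts.items())
--     best = items[0]
--     for item in items[1:]:
--         if item[1] > best[1]:
--             best = item
--     return best[0]
-- ===== Notes on version B (the rewrite author's own statement) =====
-- stated objective: alternative
-- what changed: Replaces the full descending sort of the label-count items (and A's off-by-one 0-initialised counting) with a single linear strict-greater max scan over the count items, which returns the same first-appearing argmax label.
import Mathlib
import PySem

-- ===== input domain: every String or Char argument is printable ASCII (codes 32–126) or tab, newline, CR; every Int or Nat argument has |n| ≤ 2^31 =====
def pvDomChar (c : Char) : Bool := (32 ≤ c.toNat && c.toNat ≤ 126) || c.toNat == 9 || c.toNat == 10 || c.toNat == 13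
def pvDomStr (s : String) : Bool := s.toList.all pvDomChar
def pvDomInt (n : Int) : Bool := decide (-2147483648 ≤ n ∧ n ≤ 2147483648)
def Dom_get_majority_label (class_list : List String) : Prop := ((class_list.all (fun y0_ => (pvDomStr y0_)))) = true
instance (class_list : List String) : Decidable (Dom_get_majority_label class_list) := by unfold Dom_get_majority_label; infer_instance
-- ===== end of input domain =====

-- B replaces A's full descending sort of the count items by a single linear strict-'>' max scan
-- (objective: alternative; not measurably faster here since the sort runs over the few distinct labels only).

-- ===== PORT A =====
def get_majority_label (class_list : List String) : String :=
  match PySem.List.pyGet?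
      (PySem.List.sorted
        (class_list.foldl (fun d vote =>
          if d.contains vote = false then d.insert vote 0
          else d.modify vote 0 (· + 1)) PySem.Dict.empty
          : PySem.Dict String Int).items
        (fun p => p.2) true) 0 with
  | some p => p.1
  | none => ""   -- IndexError on empty input; excluded by Pre_

-- ===== PORT B =====
def get_majority_label_alt (class_list : List String) : String :=
  match (class_list.foldl (fun d x => d.insert x (d.getD x 0 + 1)) PySem.Dict.empty
      : PySem.Dict String Int).items with
  | [] => ""   -- items[0] raises IndexError on empty input; excluded by Pre_
  | best :: rest =>
    (rest.foldl (fun best item => if best.2 < item.2 then item else best) best).1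

-- ===== PRECONDITION & SPEC =====
-- Pre_ excludes only the empty list, on which both Pythons raise IndexError.
def Pre_get_majority_label (class_list : List String) : Prop := class_list ≠ []
instance (class_list : List String) : Decidable (Pre_get_majority_label class_list) := by
  unfold Pre_get_majority_label; infer_instance
def pvWitness_get_majority_label : List String := (["a", "b", "a"])

def Spec_get_majority_label (class_list : List String) (out : String) : Prop :=
  out = get_majority_label_alt class_list
instance (class_list : List String) (out : String) : Decidable (Spec_get_majority_label class_list out) := by
  unfold Spec_get_majority_label; infer_instance

-- ===== CLAIM (what is proved, stated in full; the proofs are below) =====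
def Claim_equal_get_majority_label : Prop := ∀ (class_list : List String), Dom_get_majority_label class_list → Pre_get_majority_label class_list → Spec_get_majority_label class_list (get_majority_label class_list)

-- ===== LEMMAS AND PROOFS =====

-- shift on a count item: A's dict stores (count - 1) where B's stores count
def pvShift (p : String × Int) : String × Int := (p.1, p.2 - 1)

theorem pv_items_shift :
    ∀ (l : List String) (dA dC : PySem.Dict String Int),
      dA.items = dC.items.map pvShift →
      (l.foldl (fun d vote =>
          if d.contains vote = false then d.insert vote 0
          else d.modify vote 0 (· + 1)) dA).items
        = (l.foldl (fun d x => d.modify x 0 (· + 1)) dC).items.map pvShift := by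
  intro l
  induction l with
  | nil => intro dA dC h; simpa using h
  | cons v l ih =>
    intro dA dC h
    simp only [List.foldl_cons]
    apply ih
    have hpred : ((fun p : String × Int => p.1 == v) ∘ pvShift)
        = (fun p : String × Int => p.1 == v) := by
      funext p; simp [pvShift]
    have hc : dA.contains v = dC.contains v := by
      simp [PySem.Dict.contains, h, List.any_map, hpred]
    have hg : dA.get? v = (dC.get? v).map (fun c => c - 1) := by
      simp only [PySem.Dict.get?, h]
      rw [List.find?_map, hpred]
      cases List.find? (fun p => p.1 == v) dC.items <;> simp [pvShift]
    by_cases hcv : dC.contains v = true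
    · -- present in both: A does modify · 0 (·+1), C does modify · 0 (·+1)
      rw [hc, hcv]
      simp only [Bool.true_eq_false, if_false]
      -- both sides are inserts on a present key
      obtain ⟨c, hcEq⟩ : ∃ c, dC.get? v = some c := by
        cases hgc : dC.get? v with
        | none =>
          exfalso
          have := PySem.Dict.get?_eq_none_iff_contains (d := dC) (k := v)
          simp [hgc, hcv] at this
        | some c => exact ⟨c, rfl⟩
      have hAc : dA.contains v = true := hc ▸ hcv
      simp only [PySem.Dict.modify, PySem.Dict.getD, hcEq, hg, Option.map_some,
        Option.getD_some]
      simp only [PySem.Dict.insert, hAc, hcv, if_true]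
      simp only [h, List.map_map]
      apply List.map_congr_left
      intro p _
      by_cases hp : p.1 == v <;> simp [Function.comp, pvShift, hp]
    · -- absent in both: A inserts 0, C inserts 0+1 = 1
      rw [hc]
      simp only [Bool.not_eq_true] at hcv
      rw [hcv]
      simp only [if_true]
      have hgc : dC.get? v = none := by
        have := PySem.Dict.get?_eq_none_iff_contains (d := dC) (k := v)
        simp [hcv] at this
        exact this
      have hAc : dA.contains v = false := hc ▸ hcv
      simp only [PySem.Dict.modify, PySem.Dict.getD, hgc, Option.getD_none]
      simp only [PySem.Dict.insert, hAc, hcv, Bool.false_eq_true, if_false]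
      simp [h, pvShift]

-- head of the stable reverse sort is the strict-'>' left max scan
theorem pv_head_sorted_rev {α : Type} (key : α → Int)
    (l : List α) (h : α) (t : List α) :
    (List.foldl (fun acc x => PySem.List.insertBy (fun a b => decide (key b < key a)) x acc)
        (h :: t) l).head?
      = some (l.foldl (fun b x => if key b < key x then x else b) h) := by
  induction l generalizing h t with
  | nil => rfl
  | cons x l ih =>
    simp only [List.foldl_cons]
    by_cases hx : key h < key x
    · have : PySem.List.insertBy (fun a b => decide (key b < key a)) x (h :: t)
          = x :: h :: t := by simp [PySem.List.insertBy, hx]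
      rw [this, ih, if_pos hx]
    · have : PySem.List.insertBy (fun a b => decide (key b < key a)) x (h :: t)
          = h :: PySem.List.insertBy (fun a b => decide (key b < key a)) x t := by
        simp [PySem.List.insertBy, hx]
      rw [this, ih, if_neg hx]

-- the max scan commutes with the uniform shift by -1
theorem pv_scan_shift (l : List (String × Int)) (b : String × Int) :
    (l.map pvShift).foldl (fun b x => if b.2 < x.2 then x else b) (pvShift b)
      = pvShift (l.foldl (fun b x => if b.2 < x.2 then x else b) b) := by
  induction l generalizing b with
  | nil => rfl
  | cons x l ih =>
    simp only [List.map_cons, List.foldl_cons]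
    rw [← ih]
    congr 1
    by_cases hx : b.2 < x.2
    · rw [if_pos hx, if_pos (by simp [pvShift]; omega)]
    · rw [if_neg hx, if_neg (by simp [pvShift]; omega)]

-- ===== VERDICT (by name: the statement is the Claim_ definition above) =====
theorem get_majority_label_spec : Claim_equal_get_majority_label := by
  intro class_list _ hpre
  unfold Spec_get_majority_label get_majority_label get_majority_label_alt
  rw [PySem.Dict.foldl_insert_getD_add_one_eq_counter]
  have hitems :
      (class_list.foldl (fun d vote =>
          if d.contains vote = false then d.insert vote 0
          else d.modify vote 0 (· + 1)) PySem.Dict.empty).items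
        = (PySem.Dict.counter class_list).items.map pvShift := by
    rw [PySem.Dict.counter]
    exact pv_items_shift class_list _ _ (by rfl)
  simp only [hitems]
  -- the counter's items list is nonempty
  obtain ⟨h, t, hht⟩ : ∃ h t, (PySem.Dict.counter class_list).items = h :: t := by
    cases hi : (PySem.Dict.counter class_list).items with
    | nil =>
      exfalso
      cases class_list with
      | nil => exact hpre rfl
      | cons a l =>
        have hmem : a ∈ PySem.Set.ofList (a :: l) := by
          rw [PySem.Set.mem_ofList]; exact List.mem_cons_self
        have := PySem.Dict.items_counter (a :: l)
        rw [hi] at this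
        rcases List.eq_nil_of_map_eq_nil this.symm with h0
        rw [h0] at hmem
        exact absurd hmem (List.not_mem_nil)
    | cons h t => exact ⟨h, t, rfl⟩
  simp only [hht]
  simp only [List.map_cons]
  have hsort := pv_head_sorted_rev (fun p : String × Int => p.2)
    (t.map pvShift) (pvShift h) []
  have hsorted : PySem.List.sorted (pvShift h :: t.map pvShift) (fun p => p.2) true
      = (List.foldl (fun acc x =>
          PySem.List.insertBy (fun a b => decide ((fun p : String × Int => p.2) b < (fun p : String × Int => p.2) a)) x acc)
          (pvShift h :: []) (t.map pvShift)) := by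
    rw [PySem.List.sorted_rev_eq_foldl_insertBy]
    rfl
  rw [hsorted]
  cases hfold : (List.foldl (fun acc x =>
      PySem.List.insertBy (fun a b => decide ((fun p : String × Int => p.2) b < (fun p : String × Int => p.2) a)) x acc)
      (pvShift h :: []) (t.map pvShift)) with
  | nil =>
    exfalso
    have := pv_head_sorted_rev (fun p : String × Int => p.2) (t.map pvShift) (pvShift h) []
    rw [hfold] at this
    simp at this
  | cons m rest =>
    have hm : m = (t.map pvShift).foldl (fun b x => if b.2 < x.2 then x else b) (pvShift h) := by
      have := pv_head_sorted_rev (fun p : String × Int => p.2) (t.map pvShift) (pvShift h) []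
      rw [hfold] at this
      simpa using this
    have hget : PySem.List.pyGet? (m :: rest) 0 = some m := by
      simp [PySem.List.pyGet?, PySem.List.pyIdx?]
    rw [hget]
    rw [hm, pv_scan_shift]
    rfl
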